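-- pv_equiv track=rewrite | github.com/ceviixx/umami-sender | backend/app/utils/logging.py | _aggregate_status_from_details
-- ===== SOURCE A (Python) =====
-- def _aggregate_status_from_details(details: list[str]) -> str:
--     if not details:
--         return "skipped"  # Nichts getan
--     statuses = [d.get("status") for d in details]
--     if all(s == "success" for s in statuses):
--         return "success"
--     if all(s == "failed" for s in statuses):
--         return "failed"
--     # Mischung oder enthaltene "skipped"/"failed" → warning
--     return "warning"
-- ===== SOURCE B (Python) =====
-- def _aggregate_status_from_details(details: list[str]) -> str:
--     if not details:
--         return "skipped"
--
--     def norm(d):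
--         s = d.get("status")
--         return s if s in ("success", "failed") else "warning"
--
--     def combine(a, b):
--         return a if a == b else "warning"
--
--     acc = norm(details[0])
--     for d in details[1:]:
--         acc = combine(acc, norm(d))
--     return acc
-- ===== Notes on version B (the rewrite author's own statement) =====
-- stated objective: alternative
-- what changed: Replaces the two staged all()-scans over a statuses list by a single left-fold with a semigroup combine (each item normalized to success/failed/warning; equal labels kept, unequal collapsed to warning), producing the answer directly in one pass.
import Mathlib
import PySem

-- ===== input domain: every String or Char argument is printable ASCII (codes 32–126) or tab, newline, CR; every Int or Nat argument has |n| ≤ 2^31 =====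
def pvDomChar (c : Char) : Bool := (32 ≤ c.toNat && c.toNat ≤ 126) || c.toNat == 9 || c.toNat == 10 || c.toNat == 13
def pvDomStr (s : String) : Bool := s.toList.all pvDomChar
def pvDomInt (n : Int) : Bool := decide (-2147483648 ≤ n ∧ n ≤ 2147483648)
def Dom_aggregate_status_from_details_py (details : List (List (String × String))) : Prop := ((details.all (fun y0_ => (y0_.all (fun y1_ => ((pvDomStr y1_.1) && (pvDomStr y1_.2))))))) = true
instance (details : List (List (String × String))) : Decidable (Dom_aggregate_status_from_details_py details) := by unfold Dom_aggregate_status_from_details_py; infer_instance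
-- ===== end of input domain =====

-- B replaces A's two staged all()-scans by one left-fold with a pairwise combine over normalized labels (alternative decomposition, same cost).

-- ===== PORT A =====
def aggregate_status_from_details_py (details : List (List (String × String))) : String :=
  if details = [] then "skipped"
  else
    let statuses := details.map (fun d => PySem.Dict.get? ⟨d⟩ "status")
    if statuses.all (fun s => s == some "success") then "success"
    else if statuses.all (fun s => s == some "failed") then "failed"
    else "warning"

-- ===== PORT B =====
-- norm: the per-item label (as in Source B)
def pvNormB (d : List (String × String)) : String :=
  match PySem.Dict.get? (⟨d⟩ : PySem.Dict String String) "status" with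
  | some s => if s = "success" ∨ s = "failed" then s else "warning"
  | none => "warning"

-- combine: the pairwise semigroup operation (as in Source B)
def pvCombineB (a b : String) : String := if a = b then a else "warning"

def aggregate_status_from_details_py_alt (details : List (List (String × String))) : String :=
  match details with
  | [] => "skipped"
  | d :: rest => rest.foldl (fun acc e => pvCombineB acc (pvNormB e)) (pvNormB d)

-- ===== PRECONDITION & SPEC =====
def Spec_aggregate_status_from_details_py (details : List (List (String × String))) (out : String) : Prop := out = aggregate_status_from_details_py_alt details
instance (details : List (List (String × String))) (out : String) : Decidable (Spec_aggregate_status_from_details_py details out) := by unfold Spec_aggregate_status_from_details_py; infer_instance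

-- ===== CLAIM (what is proved, stated in full; the proofs are below) =====
def Claim_equal_aggregate_status_from_details_py : Prop := ∀ (details : List (List (String × String))), Dom_aggregate_status_from_details_py details → Spec_aggregate_status_from_details_py details (aggregate_status_from_details_py details)

-- ===== LEMMAS AND PROOFS =====

-- the fold collapses to: keep the start label iff every element's label equals it, else "warning"
theorem foldB_char (l : List (List (String × String))) (a : String) :
    l.foldl (fun acc e => pvCombineB acc (pvNormB e)) a
      = if l.all (fun e => pvNormB e = a) then a else "warning" := by
  induction l generalizing a with
  | nil => simp
  | cons e l ih =>
    simp only [List.foldl_cons, List.all_cons]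
    by_cases h : pvNormB e = a
    · have hc : pvCombineB a (pvNormB e) = a := by simp [pvCombineB, h]
      rw [hc, ih]
      simp [h]
    · have hc : pvCombineB a (pvNormB e) = "warning" := by
        simp [pvCombineB]; intro h'; exact absurd h'.symm h
      rw [hc, ih]
      simp [h]

theorem norm_eq_success (d : List (String × String)) :
    (pvNormB d = "success") ↔ PySem.Dict.get? (⟨d⟩ : PySem.Dict String String) "status" = some "success" := by
  unfold pvNormB
  cases h : PySem.Dict.get? (⟨d⟩ : PySem.Dict String String) "status" with
  | none => simp
  | some s =>
    by_cases h1 : s = "success"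
    · subst h1; simp
    · by_cases h2 : s = "failed"
      · subst h2; simp
      · simp [h1, h2]

theorem norm_eq_failed (d : List (String × String)) :
    (pvNormB d = "failed") ↔ PySem.Dict.get? (⟨d⟩ : PySem.Dict String String) "status" = some "failed" := by
  unfold pvNormB
  cases h : PySem.Dict.get? (⟨d⟩ : PySem.Dict String String) "status" with
  | none => simp
  | some s =>
    by_cases h1 : s = "success"
    · subst h1; simp
    · by_cases h2 : s = "failed"
      · subst h2; simp
      · simp [h1, h2]

-- ===== VERDICT (by name: the statement is the Claim_ definition above) =====
theorem aggregate_status_from_details_py_spec : Claim_equal_aggregate_status_from_details_py := by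
  intro details _
  unfold Spec_aggregate_status_from_details_py
  unfold aggregate_status_from_details_py aggregate_status_from_details_py_alt
  match details with
  | [] => simp
  | d :: rest =>
    simp only [if_neg (by simp : ¬ (d :: rest = []))]
    rw [foldB_char]
    simp only [List.map_cons, List.all_cons]
    by_cases hd : pvNormB d = "success"
    · have hget := (norm_eq_success d).mp hd
      by_cases hrest : rest.all (fun e => pvNormB e = "success") = true
      · have : (rest.map (fun d => PySem.Dict.get? (⟨d⟩ : PySem.Dict String String) "status")).all (fun s => s == some "success") = true := by
          simp only [List.all_map, List.all_eq_true] at hrest ⊢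
          intro e he
          simpa [← norm_eq_success] using hrest e he
        simp [hget, this, hd, hrest]
      · have : (rest.map (fun d => PySem.Dict.get? (⟨d⟩ : PySem.Dict String String) "status")).all (fun s => s == some "success") = false := by
          rw [Bool.eq_false_iff]
          intro hc
          apply hrest
          simp only [List.all_map, List.all_eq_true, decide_eq_true_eq] at hc ⊢
          intro e he
          exact (norm_eq_success e).mpr (by simpa [Function.comp] using hc e he)
        -- A's first branch fails; A's second branch fails (head is success, not failed)
        have hne : ¬ (PySem.Dict.get? (⟨d⟩ : PySem.Dict String String) "status" == some "failed") = true := by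
          simp [hget]
        simp [this, hd, hrest, hget]
    · by_cases hf : pvNormB d = "failed"
      · have hget := (norm_eq_failed d).mp hf
        have hns : ¬ (PySem.Dict.get? (⟨d⟩ : PySem.Dict String String) "status" == some "success") = true := by
          simp [hget]
        by_cases hrest : rest.all (fun e => pvNormB e = "failed") = true
        · have : (rest.map (fun d => PySem.Dict.get? (⟨d⟩ : PySem.Dict String String) "status")).all (fun s => s == some "failed") = true := by
            simp only [List.all_map, List.all_eq_true] at hrest ⊢
            intro e he
            simpa [← norm_eq_failed] using hrest e he
          simp [hget, this, hf, hrest]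
        · have : (rest.map (fun d => PySem.Dict.get? (⟨d⟩ : PySem.Dict String String) "status")).all (fun s => s == some "failed") = false := by
            rw [Bool.eq_false_iff]
            intro hc
            apply hrest
            simp only [List.all_map, List.all_eq_true, decide_eq_true_eq] at hc ⊢
            intro e he
            exact (norm_eq_failed e).mpr (by simpa [Function.comp] using hc e he)
          simp [hget, this, hf, hrest]
      · -- head label is "warning": A's both alls fail on the head; B gives warning either way
        have hns : ¬ (PySem.Dict.get? (⟨d⟩ : PySem.Dict String String) "status" == some "success") = true := by
          simp only [beq_iff_eq]
          intro hc; exact hd ((norm_eq_success d).mpr hc)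
        have hnf : ¬ (PySem.Dict.get? (⟨d⟩ : PySem.Dict String String) "status" == some "failed") = true := by
          simp only [beq_iff_eq]
          intro hc; exact hf ((norm_eq_failed d).mpr hc)
        have hw : pvNormB d = "warning" := by
          unfold pvNormB at hd hf ⊢
          cases h : PySem.Dict.get? (⟨d⟩ : PySem.Dict String String) "status" with
          | none => simp
          | some s =>
            rw [h] at hd hf
            by_cases hs : s = "success" ∨ s = "failed"
            · rcases hs with hs | hs <;> subst hs <;> simp_all
            · simp [hs]
        simp [hns, hnf, hw]
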